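-- pv_equiv track=rewrite | github.com/ankul-in/Two-years | KATA336.py | skiponacci
-- ===== SOURCE A (Python) =====
-- def skiponacci(n):
--     answer=[]
--     a,b=1,1
--     for i in range(n):
--         if i%2==0:
--             answer.append(str(a))
--         else:
--             answer.append("skip")
--         a,b=b,a+b
--     return " ".join(answer)
-- ===== SOURCE B (Python) =====
-- def skiponacci(n):
--     if n <= 0:
--         return ""
--     k = (n + 1) // 2          # number of numeric slots (even indices)
--     vals = [1]
--     x, y = 1, 2               # consecutive even-index Fibonacci values; next = 3*y - x
--     for _ in range(k - 1):
--         vals.append(y)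
--         x, y = y, 3 * y - x
--     out = " skip ".join(str(v) for v in vals)
--     if n % 2 == 0:
--         out += " skip"
--     return out
-- ===== Notes on version B (the rewrite author's own statement) =====
-- stated objective: alternative
-- what changed: B iterates only over the ceil(n/2) numeric slots, generating the even-index Fibonacci values with the recurrence y' = 3*y - x, then joins them with ' skip ' (appending a trailing ' skip' for even n), instead of A's per-slot loop over all n positions with the Fibonacci pair update.
import Mathlib
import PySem

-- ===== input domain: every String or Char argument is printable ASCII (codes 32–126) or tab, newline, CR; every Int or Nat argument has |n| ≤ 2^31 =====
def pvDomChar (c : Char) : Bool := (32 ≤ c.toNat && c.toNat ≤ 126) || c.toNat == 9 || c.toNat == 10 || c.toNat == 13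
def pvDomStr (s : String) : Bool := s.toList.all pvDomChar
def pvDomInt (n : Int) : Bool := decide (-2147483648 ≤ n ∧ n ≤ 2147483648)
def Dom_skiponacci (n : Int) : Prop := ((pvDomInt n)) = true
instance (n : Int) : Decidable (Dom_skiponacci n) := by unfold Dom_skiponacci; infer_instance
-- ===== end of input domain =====

-- B iterates only over the ceil(n/2) numeric slots using the even-index recurrence
-- y' = 3*y - x, then joins the values with " skip " (trailing " skip" for even n);
-- a different decomposition of the same output (not claimed faster).

-- ===== PORT A =====
-- loop body of A: state = (answer, a, b)
def skipStepA (st : List String × Int × Int) (i : Int) : List String × Int × Int :=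
  let answer := if PySem.Int.mod i 2 = 0 then st.1 ++ [PySem.Int.toStr st.2.1]
                else st.1 ++ ["skip"]
  (answer, st.2.2, st.2.1 + st.2.2)

def skiponacci (n : Int) : String :=
  PySem.Str.join " " ((PySem.List.pyRange 0 n 1).foldl skipStepA ([], 1, 1)).1

-- ===== PORT B =====
-- loop body of B: state = (vals, x, y); appends y and advances (x, y) := (y, 3*y - x)
def skipStepB (st : List Int × Int × Int) (_ : Int) : List Int × Int × Int :=
  (st.1 ++ [st.2.2], st.2.2, 3 * st.2.2 - st.2.1)

def skiponacci_alt (n : Int) : String :=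
  if n ≤ 0 then "" else
    let k := PySem.Int.floordiv (n + 1) 2
    let vals := ((PySem.List.pyRange 0 (k - 1) 1).foldl skipStepB ([1], 1, 2)).1
    let out := PySem.Str.join " skip " (vals.map PySem.Int.toStr)
    if PySem.Int.mod n 2 = 0 then out ++ " skip" else out

-- ===== PRECONDITION & SPEC =====
def Spec_skiponacci (n : Int) (out : String) : Prop := out = skiponacci_alt n
instance (n : Int) (out : String) : Decidable (Spec_skiponacci n out) := by unfold Spec_skiponacci; infer_instance

-- ===== CLAIM (what is proved, stated in full; the proofs are below) =====
def Claim_equal_skiponacci : Prop := ∀ (n : Int), Dom_skiponacci n → Spec_skiponacci n (skiponacci n)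

-- ===== LEMMAS AND PROOFS =====

-- even-index Fibonacci values a, a+b, 2a+3b, … (two Fibonacci steps per entry)
def valsFib (a b : Int) : Nat → List Int
  | 0 => []
  | m + 1 => a :: valsFib (a + b) (a + 2 * b) m

-- the Fibonacci pair after 2m steps
def pairFib (a b : Int) : Nat → Int × Int
  | 0 => (a, b)
  | m + 1 => pairFib (a + b) (a + 2 * b) m

-- values produced by B's loop from state (x, y)
def valsG (x y : Int) : Nat → List Int
  | 0 => []
  | m + 1 => y :: valsG y (3 * y - x) m

theorem valsFib_eq_valsG (m : Nat) : ∀ (a b : Int),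
    valsFib a b (m + 1) = a :: valsG a (a + b) m := by
  induction m with
  | zero => intro a b; rfl
  | succ m ih =>
    intro a b
    show a :: valsFib (a + b) (a + 2 * b) (m + 1)
        = a :: (a + b) :: valsG (a + b) (3 * (a + b) - a) m
    rw [ih (a + b) (a + 2 * b)]
    have h : 3 * (a + b) - a = (a + b) + (a + 2 * b) := by ring
    rw [h]

theorem valsFib_snoc (m : Nat) : ∀ (a b : Int),
    valsFib a b (m + 1) = valsFib a b m ++ [(pairFib a b m).1] := by
  induction m with
  | zero => intro a b; rfl
  | succ m ih =>
    intro a b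
    show a :: valsFib (a + b) (a + 2 * b) (m + 1)
        = (a :: valsFib (a + b) (a + 2 * b) m) ++ _
    rw [ih (a + b) (a + 2 * b)]
    rfl

-- A's loop over 2m steps from an even index
theorem foldA_even (m : Nat) : ∀ (i : Int) (acc : List String) (a b : Int),
    PySem.Int.mod i 2 = 0 →
    (PySem.List.pyRange i (i + (2 * m : Nat)) 1).foldl skipStepA (acc, a, b)
      = (acc ++ (valsFib a b m).flatMap (fun v => [PySem.Int.toStr v, "skip"]),
         pairFib a b m) := by
  induction m with
  | zero => intro i acc a b _; simp [valsFib, pairFib]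
  | succ m ih =>
    intro i acc a b hmod
    have hm : PySem.Int.mod i 2 = Int.emod i 2 := PySem.Int.mod_eq_emod_of_pos (by omega)
    rw [hm] at hmod
    have hdvd : (2:Int) ∣ i := Int.dvd_of_emod_eq_zero hmod
    have heq1 : (i + 1) % 2 = 1 := by omega
    have h1 : PySem.List.pyRange i (i + (2 * (m+1) : Nat)) 1
        = i :: PySem.List.pyRange (i+1) (i + (2 * (m+1) : Nat)) 1 :=
      PySem.List.pyRange_one_cons (by push_cast; omega)
    have h2 : PySem.List.pyRange (i+1) (i + (2 * (m+1) : Nat)) 1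
        = (i+1) :: PySem.List.pyRange (i+2) (i + (2 * (m+1) : Nat)) 1 := by
      have : i + 1 < i + ((2 * (m+1) : Nat) : Int) := by push_cast; omega
      rw [PySem.List.pyRange_one_cons this]; ring_nf
    rw [h1, h2]
    simp only [List.foldl_cons]
    have hstep : skipStepA (skipStepA (acc, a, b) i) (i+1)
        = (acc ++ [PySem.Int.toStr a, "skip"], a + b, a + 2 * b) := by
      simp [skipStepA, hdvd, heq1]; ring
    rw [hstep]
    have hmod2 : PySem.Int.mod (i+2) 2 = 0 := by
      rw [PySem.Int.mod_eq_emod_of_pos (by omega)]; omega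
    have hr : i + ((2 * (m+1) : Nat) : Int) = (i + 2) + ((2 * m : Nat) : Int) := by
      push_cast; ring
    rw [hr, ih (i + 2) _ (a + b) (a + 2 * b) hmod2]
    simp [valsFib, pairFib]

-- B's loop appends valsG
theorem foldB (m : Nat) : ∀ (i : Int) (acc : List Int) (x y : Int),
    ((PySem.List.pyRange i (i + (m : Nat)) 1).foldl skipStepB (acc, x, y)).1
      = acc ++ valsG x y m := by
  induction m with
  | zero => intro i acc x y; simp [valsG]
  | succ m ih =>
    intro i acc x y
    have h1 : PySem.List.pyRange i (i + ((m+1 : Nat) : Int)) 1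
        = i :: PySem.List.pyRange (i+1) (i + ((m+1 : Nat) : Int)) 1 :=
      PySem.List.pyRange_one_cons (by push_cast; omega)
    rw [h1]
    simp only [List.foldl_cons]
    have hr : i + ((m+1 : Nat) : Int) = (i + 1) + ((m : Nat) : Int) := by push_cast; ring
    rw [show skipStepB (acc, x, y) i = (acc ++ [y], y, 3 * y - x) from rfl, hr,
        ih (i + 1) (acc ++ [y]) y (3 * y - x)]
    simp [valsG]

-- join with sep over tokens interleaved with sk, even count (trailing sk)
theorem join_interleave_even (sp sk : List Char) (ts : List (List Char)) (hne : ts ≠ []) :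
    PySem.Chars.join sp (ts.flatMap (fun t => [t, sk]))
      = PySem.Chars.join (sp ++ sk ++ sp) ts ++ sp ++ sk := by
  induction ts with
  | nil => exact absurd rfl hne
  | cons t ts ih =>
    cases ts with
    | nil =>
      simp [PySem.Chars.join_cons_cons, PySem.Chars.join_singleton]
    | cons u us =>
      have ihne := ih (by simp)
      simp only [List.flatMap_cons, List.cons_append, List.nil_append] at *
      rw [PySem.Chars.join_cons_cons, PySem.Chars.join_cons_cons, ihne,
          PySem.Chars.join_cons_cons]
      simp [List.append_assoc]

-- join with sep over tokens interleaved with sk, odd count (extra final token)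
theorem join_interleave_odd (sp sk : List Char) (ts : List (List Char)) :
    ∀ (last : List Char),
    PySem.Chars.join sp (ts.flatMap (fun t => [t, sk]) ++ [last])
      = PySem.Chars.join (sp ++ sk ++ sp) (ts ++ [last]) := by
  induction ts with
  | nil => intro last; simp
  | cons t ts ih =>
    intro last
    obtain ⟨h, tl, hl⟩ : ∃ h tl, ts.flatMap (fun t => [t, sk]) ++ [last] = h :: tl :=
      List.exists_cons_of_ne_nil (by simp)
    obtain ⟨h2, tl2, hl2⟩ : ∃ h2 tl2, ts ++ [last] = h2 :: tl2 :=
      List.exists_cons_of_ne_nil (by simp)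
    simp only [List.flatMap_cons, List.cons_append, List.nil_append]
    rw [PySem.Chars.join_cons_cons, hl, PySem.Chars.join_cons_cons, ← hl, ih last,
        hl2, PySem.Chars.join_cons_cons, ← hl2]
    simp [List.append_assoc]

-- mapping String.toList through A's token list
theorem map_toList_flat (vs : List Int) :
    (vs.flatMap (fun v => [PySem.Int.toStr v, "skip"])).map String.toList
      = (vs.map (fun v => (PySem.Int.toStr v).toList)).flatMap
          (fun t => [t, "skip".toList]) := by
  induction vs with
  | nil => rfl
  | cons v vs ih => simp [ih]

-- two strings with the same char list are equal
theorem string_eq_of_toList {s t : String} (h : s.toList = t.toList) : s = t := by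
  have := congrArg String.ofList h
  simpa [String.ofList_toList] using this

-- ===== VERDICT (by name: the statement is the Claim_ definition above) =====
theorem skiponacci_spec : Claim_equal_skiponacci := by
  intro n _
  unfold Spec_skiponacci skiponacci skiponacci_alt
  by_cases hn : n ≤ 0
  · rw [if_pos hn, PySem.List.pyRange_one_eq_nil hn]
    decide
  · rw [if_neg hn]
    obtain ⟨m, hm⟩ : ∃ m, n = 2 * (m : Nat) + 1 ∨ n = 2 * (m : Nat) + 2 :=
      ⟨((n - 1) / 2).toNat, by omega⟩
    have hk : PySem.Int.floordiv (n + 1) 2 = (m : Nat) + 1 := by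
      rw [PySem.Int.floordiv_eq_ediv_of_pos (by omega)]; omega
    have hmodn : PySem.Int.mod n 2 = n % 2 := PySem.Int.mod_eq_emod_of_pos (by omega)
    have hvals : ((PySem.List.pyRange 0 (((m : Nat) + 1) - 1) 1).foldl skipStepB ([1], 1, 2)).1
        = valsFib 1 1 (m + 1) := by
      have h0 : (((m : Nat) + 1) - 1 : Int) = 0 + ((m : Nat) : Int) := by ring
      rw [h0, foldB m 0 [1] 1 2, valsFib_eq_valsG m 1 1]
      rfl
    simp only [hk, hvals, hmodn]
    rcases hm with hm | hm
    · -- n odd: n = 2m + 1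
      rw [if_neg (by omega)]
      have hsplit : PySem.List.pyRange 0 n 1
          = PySem.List.pyRange 0 (0 + (2 * m : Nat)) 1 ++ [((2 * m : Nat) : Int)] := by
        rw [PySem.List.pyRange_one_append 0 ((2 * m : Nat) : Int) n (by positivity) (by omega)]
        congr 1
        · simp
        · have : n = ((2 * m : Nat) : Int) + 1 := by omega
          rw [this, PySem.List.pyRange_one_singleton]
      rw [hsplit, List.foldl_append, foldA_even m 0 [] 1 1 (by decide)]
      have hmod2m : PySem.Int.mod ((2 * m : Nat) : Int) 2 = 0 := by
        rw [PySem.Int.mod_eq_emod_of_pos (by omega)]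
        omega
      simp only [List.foldl_cons, List.foldl_nil, skipStepA, hmod2m, if_pos, List.nil_append]
      apply string_eq_of_toList
      rw [PySem.Str.toList_join, PySem.Str.toList_join]
      rw [List.map_append, map_toList_flat]
      have hjo := join_interleave_odd (" ".toList) ("skip".toList)
        ((valsFib 1 1 m).map (fun v => (PySem.Int.toStr v).toList))
        ((PySem.Int.toStr (pairFib 1 1 m).1).toList)
      simp only [List.map_cons, List.map_nil] at hjo ⊢
      rw [hjo, valsFib_snoc m 1 1]
      have hsep : (" ".toList ++ "skip".toList ++ " ".toList) = " skip ".toList := by decide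
      rw [hsep]
      simp [List.map_map, Function.comp_def, PySem.Int.toList_toStr]
    · -- n even: n = 2m + 2
      rw [if_pos (by omega)]
      have hn2 : n = (0 : Int) + ((2 * (m + 1) : Nat) : Int) := by push_cast; omega
      rw [hn2, foldA_even (m + 1) 0 [] 1 1 (by decide)]
      apply string_eq_of_toList
      rw [String.toList_append, PySem.Str.toList_join, PySem.Str.toList_join]
      simp only [List.nil_append]
      rw [map_toList_flat]
      have hje := join_interleave_even (" ".toList) ("skip".toList)
        ((valsFib 1 1 (m + 1)).map (fun v => (PySem.Int.toStr v).toList))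
        (by simp [valsFib])
      rw [hje]
      have hsep : (" ".toList ++ "skip".toList ++ " ".toList) = " skip ".toList := by decide
      have hts : (" ".toList ++ "skip".toList : List Char) = " skip".toList := by decide
      rw [hsep, List.append_assoc, hts]
      simp [List.map_map, Function.comp_def, PySem.Int.toList_toStr]
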